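-- pv_equiv track=rewrite | github.com/7nguyennguyen3/insights-crucible | backend/src/pipeline/services/analysis/synthesis.py | _select_best_quotes
-- ===== SOURCE A (Python) =====
-- from typing import List, Dict, Any
--
-- def _select_best_quotes(all_quotes: List[Dict], limit: int = 8) -> List[Dict]:
--     """Select the most compelling quotes, removing duplicates and prioritizing variety."""
--
--     if not all_quotes:
--         return []
--
--     # Remove duplicates based on quote text
--     seen_quotes = set()
--     unique_quotes = []
--
--     for quote_obj in all_quotes:
--         quote_text = quote_obj.get("quote", "").strip()
--         if quote_text and quote_text not in seen_quotes:
--             seen_quotes.add(quote_text)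
--             unique_quotes.append(quote_obj)
--
--     # Prioritize longer, more substantial quotes (30+ words tend to be more complete thoughts)
--     scored_quotes = []
--     for quote_obj in unique_quotes:
--         quote_text = quote_obj.get("quote", "")
--         word_count = len(quote_text.split())
--
--         # Score based on word count (prefer 30-100 word range)
--         if 30 <= word_count <= 100:
--             score = 10
--         elif 20 <= word_count < 30:
--             score = 7
--         elif 10 <= word_count < 20:
--             score = 4
--         else:
--             score = 2
--
--         scored_quotes.append((score, quote_obj))
--
--     # Sort by score (descending) and take top N
--     scored_quotes.sort(key=lambda x: x[0], reverse=True)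
--     best_quotes = [quote for score, quote in scored_quotes[:limit]]
--
--     return best_quotes
-- ===== SOURCE B (Python) =====
-- def _select_best_quotes(all_quotes, limit=8):
--     """Bucket the deduped quotes by score tier in one pass instead of sorting."""
--     seen = set()
--     b10, b7, b4, b2 = [], [], [], []
--     for quote_obj in all_quotes:
--         quote_text = quote_obj.get("quote", "").strip()
--         if quote_text and quote_text not in seen:
--             seen.add(quote_text)
--             word_count = len(quote_obj.get("quote", "").split())
--             if 30 <= word_count <= 100:
--                 b10.append(quote_obj)
--             elif 20 <= word_count < 30:
--                 b7.append(quote_obj)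
--             elif 10 <= word_count < 20:
--                 b4.append(quote_obj)
--             else:
--                 b2.append(quote_obj)
--     return (b10 + b7 + b4 + b2)[:limit]
-- ===== Notes on version B (the rewrite author's own statement) =====
-- stated objective: alternative
-- what changed: Replaces building (score, obj) tuples and stable reverse-sorting them with a single pass that partitions the deduped quotes into four score buckets (10/7/4/2) and concatenates the buckets high-to-low before slicing to limit.
import Mathlib
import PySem

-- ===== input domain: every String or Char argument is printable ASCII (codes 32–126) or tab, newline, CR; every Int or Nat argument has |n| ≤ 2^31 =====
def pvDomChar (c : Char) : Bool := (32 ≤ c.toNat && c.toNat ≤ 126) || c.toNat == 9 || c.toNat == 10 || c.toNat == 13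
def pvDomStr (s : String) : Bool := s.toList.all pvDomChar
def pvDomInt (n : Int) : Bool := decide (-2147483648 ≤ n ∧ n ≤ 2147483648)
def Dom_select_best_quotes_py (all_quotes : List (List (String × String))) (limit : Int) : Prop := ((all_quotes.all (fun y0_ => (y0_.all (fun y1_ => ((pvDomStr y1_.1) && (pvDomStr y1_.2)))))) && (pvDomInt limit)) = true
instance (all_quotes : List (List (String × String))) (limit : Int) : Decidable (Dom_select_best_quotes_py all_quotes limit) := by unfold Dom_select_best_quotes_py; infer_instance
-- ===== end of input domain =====

-- B replaces the stable reverse sort over the four discrete score tiers by a one-pass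
-- bucket partition and concatenation (objective: alternative algorithm, same result).

-- ===== PORT A =====
-- loop body of A's dedup pass (for quote_obj in all_quotes: …)
def sbqStepDedup (st : PySem.Set String × List (List (String × String)))
    (quote_obj : List (String × String)) : PySem.Set String × List (List (String × String)) :=
  let quote_text := PySem.Str.strip (PySem.Dict.getD (PySem.Dict.mk quote_obj) "quote" "")
  if quote_text ≠ "" ∧ PySem.Set.contains st.1 quote_text = false then
    (PySem.Set.add st.1 quote_text, st.2 ++ [quote_obj])
  else st

-- loop body of A's scoring pass (for quote_obj in unique_quotes: …)
def sbqStepScore (acc : List (Int × List (String × String)))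
    (quote_obj : List (String × String)) : List (Int × List (String × String)) :=
  let quote_text := PySem.Dict.getD (PySem.Dict.mk quote_obj) "quote" ""
  let word_count := (PySem.Str.split₀ quote_text).length
  let score : Int :=
    if 30 ≤ word_count ∧ word_count ≤ 100 then 10
    else if 20 ≤ word_count ∧ word_count < 30 then 7
    else if 10 ≤ word_count ∧ word_count < 20 then 4
    else 2
  acc ++ [(score, quote_obj)]

def select_best_quotes_py (all_quotes : List (List (String × String))) (limit : Int) :
    List (List (String × String)) :=
  if all_quotes = [] then []
  else
    let unique_quotes := (all_quotes.foldl sbqStepDedup (PySem.Set.empty, [])).2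
    let scored_quotes := unique_quotes.foldl sbqStepScore []
    let scored_quotes := PySem.List.sorted scored_quotes (fun x => x.1) true
    (PySem.List.slice scored_quotes none (some limit)).map (fun x => x.2)

-- ===== PORT B =====
-- B's single-pass state: (seen, bucket10, bucket7, bucket4, bucket2)
def sbqStepB
    (st : PySem.Set String × List (List (String × String)) × List (List (String × String)) ×
          List (List (String × String)) × List (List (String × String)))
    (quote_obj : List (String × String)) :
    PySem.Set String × List (List (String × String)) × List (List (String × String)) ×
          List (List (String × String)) × List (List (String × String)) :=
  let quote_text := PySem.Str.strip (PySem.Dict.getD (PySem.Dict.mk quote_obj) "quote" "")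
  if quote_text ≠ "" ∧ PySem.Set.contains st.1 quote_text = false then
    let seen := PySem.Set.add st.1 quote_text
    let w := (PySem.Str.split₀ (PySem.Dict.getD (PySem.Dict.mk quote_obj) "quote" "")).length
    if 30 ≤ w ∧ w ≤ 100 then (seen, st.2.1 ++ [quote_obj], st.2.2.1, st.2.2.2.1, st.2.2.2.2)
    else if 20 ≤ w ∧ w < 30 then (seen, st.2.1, st.2.2.1 ++ [quote_obj], st.2.2.2.1, st.2.2.2.2)
    else if 10 ≤ w ∧ w < 20 then (seen, st.2.1, st.2.2.1, st.2.2.2.1 ++ [quote_obj], st.2.2.2.2)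
    else (seen, st.2.1, st.2.2.1, st.2.2.2.1, st.2.2.2.2 ++ [quote_obj])
  else st

def select_best_quotes_py_alt (all_quotes : List (List (String × String))) (limit : Int) :
    List (List (String × String)) :=
  let st := all_quotes.foldl sbqStepB (PySem.Set.empty, [], [], [], [])
  PySem.List.slice (st.2.1 ++ st.2.2.1 ++ st.2.2.2.1 ++ st.2.2.2.2) none (some limit)

-- ===== PRECONDITION & SPEC =====
def Spec_select_best_quotes_py (all_quotes : List (List (String × String))) (limit : Int) (out : List (List (String × String))) : Prop := out = select_best_quotes_py_alt all_quotes limit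
instance (all_quotes : List (List (String × String))) (limit : Int) (out : List (List (String × String))) : Decidable (Spec_select_best_quotes_py all_quotes limit out) := by unfold Spec_select_best_quotes_py; infer_instance

-- ===== CLAIM (what is proved, stated in full; the proofs are below) =====
def Claim_equal_select_best_quotes_py : Prop := ∀ (all_quotes : List (List (String × String))) (limit : Int), Dom_select_best_quotes_py all_quotes limit → Spec_select_best_quotes_py all_quotes limit (select_best_quotes_py all_quotes limit)

-- ===== LEMMAS AND PROOFS =====

-- score of a quote object (the value A's scoring pass attaches)
def sbqScore (q : List (String × String)) : Int :=
  let w := (PySem.Str.split₀ (PySem.Dict.getD (PySem.Dict.mk q) "quote" "")).length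
  if 30 ≤ w ∧ w ≤ 100 then 10
  else if 20 ≤ w ∧ w < 30 then 7
  else if 10 ≤ w ∧ w < 20 then 4
  else 2

-- reference dedup: the unique quotes A keeps, given already-seen texts
def sbqUniq (seen : PySem.Set String) : List (List (String × String)) → List (List (String × String))
  | [] => []
  | q :: qs =>
    let t := PySem.Str.strip (PySem.Dict.getD (PySem.Dict.mk q) "quote" "")
    if t ≠ "" ∧ PySem.Set.contains seen t = false then q :: sbqUniq (PySem.Set.add seen t) qs
    else sbqUniq seen qs

def sbqSeen (seen : PySem.Set String) : List (List (String × String)) → PySem.Set String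
  | [] => seen
  | q :: qs =>
    let t := PySem.Str.strip (PySem.Dict.getD (PySem.Dict.mk q) "quote" "")
    if t ≠ "" ∧ PySem.Set.contains seen t = false then sbqSeen (PySem.Set.add seen t) qs
    else sbqSeen seen qs

lemma foldA_spec (qs : List (List (String × String))) (seen : PySem.Set String)
    (acc : List (List (String × String))) :
    qs.foldl sbqStepDedup (seen, acc) = (sbqSeen seen qs, acc ++ sbqUniq seen qs) := by
  induction qs generalizing seen acc with
  | nil => simp [sbqUniq, sbqSeen]
  | cons q qs ih =>
    simp only [List.foldl_cons, sbqStepDedup, sbqUniq, sbqSeen]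
    split_ifs with h <;> simp [ih]

lemma foldB_spec (qs : List (List (String × String))) (seen : PySem.Set String)
    (b10 b7 b4 b2 : List (List (String × String))) :
    qs.foldl sbqStepB (seen, b10, b7, b4, b2) =
      (sbqSeen seen qs,
       b10 ++ (sbqUniq seen qs).filter (fun q => decide (sbqScore q = 10)),
       b7 ++ (sbqUniq seen qs).filter (fun q => decide (sbqScore q = 7)),
       b4 ++ (sbqUniq seen qs).filter (fun q => decide (sbqScore q = 4)),
       b2 ++ (sbqUniq seen qs).filter (fun q => decide (sbqScore q = 2))) := by
  induction qs generalizing seen b10 b7 b4 b2 with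
  | nil => simp [sbqUniq, sbqSeen]
  | cons q qs ih =>
    simp only [List.foldl_cons, sbqStepB, sbqUniq, sbqSeen]
    split_ifs with h h1 h2 h3
    · have hs : sbqScore q = 10 := by simp [sbqScore, h1]
      simp [ih, hs]
    · have hs : sbqScore q = 7 := by simp only [sbqScore]; rw [if_neg h1, if_pos h2]
      simp [ih, hs]
    · have hs : sbqScore q = 4 := by simp only [sbqScore]; rw [if_neg h1, if_neg h2, if_pos h3]
      simp [ih, hs]
    · have hs : sbqScore q = 2 := by simp only [sbqScore]; rw [if_neg h1, if_neg h2, if_neg h3]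
      simp [ih, hs]
    · exact ih seen b10 b7 b4 b2

lemma foldScore_spec (u : List (List (String × String))) :
    u.foldl sbqStepScore [] = u.map (fun q => (sbqScore q, q)) := by
  have : ∀ acc, u.foldl sbqStepScore acc = acc ++ u.map (fun q => (sbqScore q, q)) := by
    induction u with
    | nil => simp
    | cons q qs ih => intro acc; simp [sbqStepScore, sbqScore, ih]
  simpa using this []

lemma insertBy_append_not_before {α : Type} (before : α → α → Bool) (x : α)
    (ys zs : List α) (h : ∀ y ∈ ys, before x y = false) :
    PySem.List.insertBy before x (ys ++ zs) = ys ++ PySem.List.insertBy before x zs := by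
  induction ys with
  | nil => rfl
  | cons y ys ih =>
    have heq : PySem.List.insertBy before x (y :: (ys ++ zs)) =
        if before x y then x :: y :: (ys ++ zs) else y :: PySem.List.insertBy before x (ys ++ zs) := rfl
    rw [List.cons_append, heq, h y (by simp)]
    simp [ih fun y hy => h y (by simp [hy])]

lemma insertBy_all_before {α : Type} (before : α → α → Bool) (x : α)
    (zs : List α) (h : ∀ y ∈ zs, before x y = true) :
    PySem.List.insertBy before x zs = x :: zs := by
  cases zs with
  | nil => rfl
  | cons z zs =>
    have heq : PySem.List.insertBy before x (z :: zs) =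
        if before x z then x :: z :: zs else z :: PySem.List.insertBy before x zs := rfl
    simp [heq, h z (by simp)]

-- the stable reverse sort of a list whose keys lie in {10,7,4,2} is the bucket concatenation
lemma sorted_rev_buckets (l : List (Int × List (String × String)))
    (hmem : ∀ x ∈ l, x.1 = 10 ∨ x.1 = 7 ∨ x.1 = 4 ∨ x.1 = 2) :
    PySem.List.sorted l (fun x => x.1) true =
      l.filter (fun x => decide (x.1 = 10)) ++ l.filter (fun x => decide (x.1 = 7)) ++
      l.filter (fun x => decide (x.1 = 4)) ++ l.filter (fun x => decide (x.1 = 2)) := by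
  rw [PySem.List.sorted_rev_eq_foldl_insertBy]
  induction l using List.reverseRecOn with
  | nil => rfl
  | append_singleton l x ih =>
    have hx := hmem x (by simp)
    have hl : ∀ y ∈ l, y.1 = 10 ∨ y.1 = 7 ∨ y.1 = 4 ∨ y.1 = 2 :=
      fun y hy => hmem y (by simp [hy])
    rw [List.foldl_append, List.foldl_cons, List.foldl_nil, ih hl]
    have hf : ∀ (s : Int) (y : Int × List (String × String)),
        y ∈ l.filter (fun x => decide (x.1 = s)) → y.1 = s := by
      intro s y hy
      simpa using (List.of_mem_filter hy)
    simp only [List.filter_append, List.filter_cons, List.filter_nil, List.append_assoc]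
    set before : (Int × List (String × String)) → (Int × List (String × String)) → Bool :=
      fun a b => decide ((fun x : Int × List (String × String) => x.1) b <
                         (fun x : Int × List (String × String) => x.1) a) with hb
    set f10 := l.filter (fun x => decide (x.1 = 10)) with hf10
    set f7 := l.filter (fun x => decide (x.1 = 7)) with hf7
    set f4 := l.filter (fun x => decide (x.1 = 4)) with hf4
    set f2 := l.filter (fun x => decide (x.1 = 2)) with hf2
    rcases hx with h | h | h | h
    · have e1 : PySem.List.insertBy before x (f10 ++ (f7 ++ (f4 ++ f2))) =
          f10 ++ (x :: (f7 ++ (f4 ++ f2))) := by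
        rw [insertBy_append_not_before before x f10 _ (by
          intro y hy
          have := hf 10 y hy
          simp only [hb, decide_eq_false_iff_not, not_lt]
          omega)]
        rw [insertBy_all_before before x _ (by
          intro y hy
          simp only [List.mem_append] at hy
          have : y.1 = 7 ∨ y.1 = 4 ∨ y.1 = 2 := by
            rcases hy with hy | hy | hy
            exacts [Or.inl (hf 7 y hy), Or.inr (Or.inl (hf 4 y hy)), Or.inr (Or.inr (hf 2 y hy))]
          simp only [hb, decide_eq_true_eq]
          omega)]
      rw [e1]
      simp [h]
    · have e1 : PySem.List.insertBy before x (f10 ++ (f7 ++ (f4 ++ f2))) =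
          f10 ++ (f7 ++ (x :: (f4 ++ f2))) := by
        rw [insertBy_append_not_before before x f10 _ (by
          intro y hy
          have := hf 10 y hy
          simp only [hb, decide_eq_false_iff_not, not_lt]
          omega)]
        rw [insertBy_append_not_before before x f7 _ (by
          intro y hy
          have := hf 7 y hy
          simp only [hb, decide_eq_false_iff_not, not_lt]
          omega)]
        rw [insertBy_all_before before x _ (by
          intro y hy
          simp only [List.mem_append] at hy
          have : y.1 = 4 ∨ y.1 = 2 := by
            rcases hy with hy | hy
            exacts [Or.inl (hf 4 y hy), Or.inr (hf 2 y hy)]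
          simp only [hb, decide_eq_true_eq]
          omega)]
      rw [e1]
      simp [h]
    · have e1 : PySem.List.insertBy before x (f10 ++ (f7 ++ (f4 ++ f2))) =
          f10 ++ (f7 ++ (f4 ++ (x :: f2))) := by
        rw [insertBy_append_not_before before x f10 _ (by
          intro y hy
          have := hf 10 y hy
          simp only [hb, decide_eq_false_iff_not, not_lt]
          omega)]
        rw [insertBy_append_not_before before x f7 _ (by
          intro y hy
          have := hf 7 y hy
          simp only [hb, decide_eq_false_iff_not, not_lt]
          omega)]
        rw [insertBy_append_not_before before x f4 _ (by
          intro y hy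
          have := hf 4 y hy
          simp only [hb, decide_eq_false_iff_not, not_lt]
          omega)]
        rw [insertBy_all_before before x f2 (by
          intro y hy
          have := hf 2 y hy
          simp only [hb, decide_eq_true_eq]
          omega)]
      rw [e1]
      simp [h]
    · have e1 : PySem.List.insertBy before x (f10 ++ (f7 ++ (f4 ++ f2))) =
          f10 ++ (f7 ++ (f4 ++ (f2 ++ [x]))) := by
        rw [insertBy_append_not_before before x f10 _ (by
          intro y hy
          have := hf 10 y hy
          simp only [hb, decide_eq_false_iff_not, not_lt]
          omega)]
        rw [insertBy_append_not_before before x f7 _ (by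
          intro y hy
          have := hf 7 y hy
          simp only [hb, decide_eq_false_iff_not, not_lt]
          omega)]
        rw [insertBy_append_not_before before x f4 _ (by
          intro y hy
          have := hf 4 y hy
          simp only [hb, decide_eq_false_iff_not, not_lt]
          omega)]
        rw [show f2 = f2 ++ [] by simp]
        rw [insertBy_append_not_before before x f2 [] (by
          intro y hy
          have := hf 2 y hy
          simp only [hb, decide_eq_false_iff_not, not_lt]
          omega)]
        simp [PySem.List.insertBy]
      rw [e1]
      simp [h]

lemma map_slice_none {α β : Type} (f : α → β) (xs : List α) (b : Int) :
    (PySem.List.slice xs none (some b)).map f = PySem.List.slice (xs.map f) none (some b) := by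
  simp [PySem.List.slice, PySem.List.clampIdx, List.map_take]

-- ===== VERDICT (by name: the statement is the Claim_ definition above) =====
theorem select_best_quotes_py_spec : Claim_equal_select_best_quotes_py := by
  intro all_quotes limit _
  unfold Spec_select_best_quotes_py select_best_quotes_py select_best_quotes_py_alt
  rw [foldB_spec]
  simp only [List.nil_append]
  by_cases hnil : all_quotes = []
  · simp [hnil, sbqUniq, PySem.List.slice, PySem.List.clampIdx]
  · rw [if_neg hnil, foldA_spec]
    simp only [List.nil_append]
    rw [foldScore_spec, sorted_rev_buckets _ (by
      intro x hx
      simp only [List.mem_map] at hx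
      obtain ⟨q, _, rfl⟩ := hx
      simp only [sbqScore]
      split_ifs <;> simp), map_slice_none]
    congr 1
    simp only [List.map_append, List.filter_map, List.map_map, Function.comp_def]
    simp [sbqScore]
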